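-- pv_equiv track=rewrite | github.com/noushahalim/efootball_auction_bot | utilities/helpers.py | calculate_manager_level
-- ===== SOURCE A (Python) =====
-- from typing import Tuple, Optional, Dict, Any, List
--
-- def calculate_manager_level(points: int) -> Tuple[int, int, int]:
--     """Calculate manager level from points"""
--     level_thresholds = [
--         0,      # Level 1
--         50,     # Level 2
--         150,    # Level 3
--         300,    # Level 4
--         500,    # Level 5
--         1000,   # Level 6
--         2000,   # Level 7
--         5000,   # Level 8
--         10000,  # Level 9
--         20000   # Level 10
--     ]
--
--     level = 1
--     for i, threshold in enumerate(level_thresholds[1:], 1):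
--         if points >= threshold:
--             level = i + 1
--         else:
--             # Current level, points to next level, total for next level
--             prev_threshold = level_thresholds[i-1]
--             points_in_level = points - prev_threshold
--             points_for_next = threshold - prev_threshold
--             return level, points_in_level, points_for_next
--
--     # Max level
--     return len(level_thresholds), 0, 0
-- ===== SOURCE B (Python) =====
-- def calculate_manager_level(points):
--     """Calculate manager level from points (binary search over the threshold table)."""
--     thresholds = [0, 50, 150, 300, 500, 1000, 2000, 5000, 10000, 20000]
--     lo, hi = 0, len(thresholds)
--     while lo < hi:
--         mid = (lo + hi) // 2
--         if points < thresholds[mid]: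
--             hi = mid
--         else:
--             lo = mid + 1
--     level = max(1, lo)
--     if level >= 10:
--         return 10, 0, 0
--     lower = thresholds[level - 1]
--     upper = thresholds[level]
--     return level, points - lower, upper - lower
-- ===== Notes on version B (the rewrite author's own statement) =====
-- stated objective: alternative
-- what changed: Replaces A's stateful linear scan over the threshold table (enumerate with an early return and a carried 'level' accumulator) by a hand-written bisect_right binary search that locates the band index directly, then computes the tier bounds by indexing.
import Mathlib
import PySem

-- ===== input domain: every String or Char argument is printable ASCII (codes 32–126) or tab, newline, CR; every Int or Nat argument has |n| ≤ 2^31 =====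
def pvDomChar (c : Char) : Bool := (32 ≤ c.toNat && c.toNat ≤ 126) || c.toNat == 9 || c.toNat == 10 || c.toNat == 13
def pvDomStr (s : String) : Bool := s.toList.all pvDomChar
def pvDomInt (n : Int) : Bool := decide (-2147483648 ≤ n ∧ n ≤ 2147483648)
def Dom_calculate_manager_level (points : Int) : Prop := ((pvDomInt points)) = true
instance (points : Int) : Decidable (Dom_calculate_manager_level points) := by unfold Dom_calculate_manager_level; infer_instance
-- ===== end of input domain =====

-- B replaces A's stateful linear scan of the threshold table by a hand-written
-- binary search (bisect_right) plus direct band arithmetic; objective: idiomatic/alternative.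

-- ===== PORT A =====
-- the loop 'for i, threshold in enumerate(level_thresholds[1:], 1)' with early return,
-- carrying the 'level' accumulator; [] case is the 'max level' return after the loop
def pvLoopA (points : Int) (thr : List Int) (pairs : List (Int × Int)) (level : Int) : Int × Int × Int :=
  match pairs with
  | [] => ((thr.length : Int), 0, 0)
  | (i, threshold) :: rest =>
    if points ≥ threshold then
      pvLoopA points thr rest (i + 1)
    else
      let prev_threshold := (PySem.List.pyGet? thr (i - 1)).getD 0  -- index always in range here
      (level, points - prev_threshold, threshold - prev_threshold)

def calculate_manager_level (points : Int) : Int × Int × Int :=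
  let level_thresholds : List Int := [0, 50, 150, 300, 500, 1000, 2000, 5000, 10000, 20000]
  pvLoopA points level_thresholds
    (PySem.List.enumerate (PySem.List.slice level_thresholds (some 1) none) 1) 1

-- ===== PORT B =====
-- the 'while lo < hi' binary-search loop of Source B; 'fuel' only makes the loop structurally
-- total (hi - lo shrinks each step, so fuel = initial hi always suffices)
def pvBisect (points : Int) (thr : List Int) (fuel lo hi : Nat) : Nat :=
  match fuel with
  | 0 => lo
  | fuel + 1 =>
    if lo < hi then
      if points < thr.getD ((lo + hi) / 2) 0 then pvBisect points thr fuel lo ((lo + hi) / 2)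
      else pvBisect points thr fuel ((lo + hi) / 2 + 1) hi
    else lo

def calculate_manager_level_alt (points : Int) : Int × Int × Int :=
  let thresholds : List Int := [0, 50, 150, 300, 500, 1000, 2000, 5000, 10000, 20000]
  let lo := pvBisect points thresholds thresholds.length 0 thresholds.length
  let level : Int := max 1 (lo : Int)
  if level ≥ 10 then (10, 0, 0)
  else
    let lower := thresholds.getD (level - 1).toNat 0
    let upper := thresholds.getD level.toNat 0
    (level, points - lower, upper - lower)

-- ===== PRECONDITION & SPEC =====
def Spec_calculate_manager_level (points : Int) (out : Int × Int × Int) : Prop := out = calculate_manager_level_alt points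
instance (points : Int) (out : Int × Int × Int) : Decidable (Spec_calculate_manager_level points out) := by unfold Spec_calculate_manager_level; infer_instance

-- ===== CLAIM (what is proved, stated in full; the proofs are below) =====
def Claim_equal_calculate_manager_level : Prop := ∀ (points : Int), Dom_calculate_manager_level points → Spec_calculate_manager_level points (calculate_manager_level points)

-- ===== LEMMAS AND PROOFS =====
-- (the verdict proof splits the integers into the 11 threshold bands and evaluates both
-- ports on each band with the band's comparison facts)

-- ===== VERDICT (by name: the statement is the Claim_ definition above) =====
theorem calculate_manager_level_spec : Claim_equal_calculate_manager_level := by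
  intro points _
  show _ = _
  unfold calculate_manager_level calculate_manager_level_alt
  by_cases h0 : points < 0
  · -- None ≤ points < 0
    have f0 : points < 0 := by omega
    have g0 : ¬ (0 ≤ points) := by omega
    have f1 : points < 50 := by omega
    have g1 : ¬ (50 ≤ points) := by omega
    have f2 : points < 150 := by omega
    have g2 : ¬ (150 ≤ points) := by omega
    have f3 : points < 300 := by omega
    have g3 : ¬ (300 ≤ points) := by omega
    have f4 : points < 500 := by omega
    have g4 : ¬ (500 ≤ points) := by omega
    have f5 : points < 1000 := by omega
    have g5 : ¬ (1000 ≤ points) := by omega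
    have f6 : points < 2000 := by omega
    have g6 : ¬ (2000 ≤ points) := by omega
    have f7 : points < 5000 := by omega
    have g7 : ¬ (5000 ≤ points) := by omega
    have f8 : points < 10000 := by omega
    have g8 : ¬ (10000 ≤ points) := by omega
    have f9 : points < 20000 := by omega
    have g9 : ¬ (20000 ≤ points) := by omega
    simp [pvLoopA, pvBisect, PySem.List.slice, PySem.List.enumerate, PySem.List.pyGet?, PySem.List.pyIdx?, f0, g0, f1, g1, f2, g2, f3, g3, f4, g4, f5, g5, f6, g6, f7, g7, f8, g8, f9, g9]
  by_cases h1 : points < 50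
  · -- 0 ≤ points < 50
    have f0 : ¬ (points < 0) := by omega
    have g0 : 0 ≤ points := by omega
    have f1 : points < 50 := by omega
    have g1 : ¬ (50 ≤ points) := by omega
    have f2 : points < 150 := by omega
    have g2 : ¬ (150 ≤ points) := by omega
    have f3 : points < 300 := by omega
    have g3 : ¬ (300 ≤ points) := by omega
    have f4 : points < 500 := by omega
    have g4 : ¬ (500 ≤ points) := by omega
    have f5 : points < 1000 := by omega
    have g5 : ¬ (1000 ≤ points) := by omega
    have f6 : points < 2000 := by omega
    have g6 : ¬ (2000 ≤ points) := by omega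
    have f7 : points < 5000 := by omega
    have g7 : ¬ (5000 ≤ points) := by omega
    have f8 : points < 10000 := by omega
    have g8 : ¬ (10000 ≤ points) := by omega
    have f9 : points < 20000 := by omega
    have g9 : ¬ (20000 ≤ points) := by omega
    simp [pvLoopA, pvBisect, PySem.List.slice, PySem.List.enumerate, PySem.List.pyGet?, PySem.List.pyIdx?, f0, g0, f1, g1, f2, g2, f3, g3, f4, g4, f5, g5, f6, g6, f7, g7, f8, g8, f9, g9]
  by_cases h2 : points < 150
  · -- 50 ≤ points < 150
    have f0 : ¬ (points < 0) := by omega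
    have g0 : 0 ≤ points := by omega
    have f1 : ¬ (points < 50) := by omega
    have g1 : 50 ≤ points := by omega
    have f2 : points < 150 := by omega
    have g2 : ¬ (150 ≤ points) := by omega
    have f3 : points < 300 := by omega
    have g3 : ¬ (300 ≤ points) := by omega
    have f4 : points < 500 := by omega
    have g4 : ¬ (500 ≤ points) := by omega
    have f5 : points < 1000 := by omega
    have g5 : ¬ (1000 ≤ points) := by omega
    have f6 : points < 2000 := by omega
    have g6 : ¬ (2000 ≤ points) := by omega
    have f7 : points < 5000 := by omega
    have g7 : ¬ (5000 ≤ points) := by omega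
    have f8 : points < 10000 := by omega
    have g8 : ¬ (10000 ≤ points) := by omega
    have f9 : points < 20000 := by omega
    have g9 : ¬ (20000 ≤ points) := by omega
    simp [pvLoopA, pvBisect, PySem.List.slice, PySem.List.enumerate, PySem.List.pyGet?, PySem.List.pyIdx?, f0, g0, f1, g1, f2, g2, f3, g3, f4, g4, f5, g5, f6, g6, f7, g7, f8, g8, f9, g9]
  by_cases h3 : points < 300
  · -- 150 ≤ points < 300
    have f0 : ¬ (points < 0) := by omega
    have g0 : 0 ≤ points := by omega
    have f1 : ¬ (points < 50) := by omega
    have g1 : 50 ≤ points := by omega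
    have f2 : ¬ (points < 150) := by omega
    have g2 : 150 ≤ points := by omega
    have f3 : points < 300 := by omega
    have g3 : ¬ (300 ≤ points) := by omega
    have f4 : points < 500 := by omega
    have g4 : ¬ (500 ≤ points) := by omega
    have f5 : points < 1000 := by omega
    have g5 : ¬ (1000 ≤ points) := by omega
    have f6 : points < 2000 := by omega
    have g6 : ¬ (2000 ≤ points) := by omega
    have f7 : points < 5000 := by omega
    have g7 : ¬ (5000 ≤ points) := by omega
    have f8 : points < 10000 := by omega
    have g8 : ¬ (10000 ≤ points) := by omega
    have f9 : points < 20000 := by omega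
    have g9 : ¬ (20000 ≤ points) := by omega
    simp [pvLoopA, pvBisect, PySem.List.slice, PySem.List.enumerate, PySem.List.pyGet?, PySem.List.pyIdx?, f0, g0, f1, g1, f2, g2, f3, g3, f4, g4, f5, g5, f6, g6, f7, g7, f8, g8, f9, g9]
  by_cases h4 : points < 500
  · -- 300 ≤ points < 500
    have f0 : ¬ (points < 0) := by omega
    have g0 : 0 ≤ points := by omega
    have f1 : ¬ (points < 50) := by omega
    have g1 : 50 ≤ points := by omega
    have f2 : ¬ (points < 150) := by omega
    have g2 : 150 ≤ points := by omega
    have f3 : ¬ (points < 300) := by omega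
    have g3 : 300 ≤ points := by omega
    have f4 : points < 500 := by omega
    have g4 : ¬ (500 ≤ points) := by omega
    have f5 : points < 1000 := by omega
    have g5 : ¬ (1000 ≤ points) := by omega
    have f6 : points < 2000 := by omega
    have g6 : ¬ (2000 ≤ points) := by omega
    have f7 : points < 5000 := by omega
    have g7 : ¬ (5000 ≤ points) := by omega
    have f8 : points < 10000 := by omega
    have g8 : ¬ (10000 ≤ points) := by omega
    have f9 : points < 20000 := by omega
    have g9 : ¬ (20000 ≤ points) := by omega
    simp [pvLoopA, pvBisect, PySem.List.slice, PySem.List.enumerate, PySem.List.pyGet?, PySem.List.pyIdx?, f0, g0, f1, g1, f2, g2, f3, g3, f4, g4, f5, g5, f6, g6, f7, g7, f8, g8, f9, g9]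
  by_cases h5 : points < 1000
  · -- 500 ≤ points < 1000
    have f0 : ¬ (points < 0) := by omega
    have g0 : 0 ≤ points := by omega
    have f1 : ¬ (points < 50) := by omega
    have g1 : 50 ≤ points := by omega
    have f2 : ¬ (points < 150) := by omega
    have g2 : 150 ≤ points := by omega
    have f3 : ¬ (points < 300) := by omega
    have g3 : 300 ≤ points := by omega
    have f4 : ¬ (points < 500) := by omega
    have g4 : 500 ≤ points := by omega
    have f5 : points < 1000 := by omega
    have g5 : ¬ (1000 ≤ points) := by omega
    have f6 : points < 2000 := by omega
    have g6 : ¬ (2000 ≤ points) := by omega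
    have f7 : points < 5000 := by omega
    have g7 : ¬ (5000 ≤ points) := by omega
    have f8 : points < 10000 := by omega
    have g8 : ¬ (10000 ≤ points) := by omega
    have f9 : points < 20000 := by omega
    have g9 : ¬ (20000 ≤ points) := by omega
    simp [pvLoopA, pvBisect, PySem.List.slice, PySem.List.enumerate, PySem.List.pyGet?, PySem.List.pyIdx?, f0, g0, f1, g1, f2, g2, f3, g3, f4, g4, f5, g5, f6, g6, f7, g7, f8, g8, f9, g9]
  by_cases h6 : points < 2000
  · -- 1000 ≤ points < 2000
    have f0 : ¬ (points < 0) := by omega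
    have g0 : 0 ≤ points := by omega
    have f1 : ¬ (points < 50) := by omega
    have g1 : 50 ≤ points := by omega
    have f2 : ¬ (points < 150) := by omega
    have g2 : 150 ≤ points := by omega
    have f3 : ¬ (points < 300) := by omega
    have g3 : 300 ≤ points := by omega
    have f4 : ¬ (points < 500) := by omega
    have g4 : 500 ≤ points := by omega
    have f5 : ¬ (points < 1000) := by omega
    have g5 : 1000 ≤ points := by omega
    have f6 : points < 2000 := by omega
    have g6 : ¬ (2000 ≤ points) := by omega
    have f7 : points < 5000 := by omega
    have g7 : ¬ (5000 ≤ points) := by omega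
    have f8 : points < 10000 := by omega
    have g8 : ¬ (10000 ≤ points) := by omega
    have f9 : points < 20000 := by omega
    have g9 : ¬ (20000 ≤ points) := by omega
    simp [pvLoopA, pvBisect, PySem.List.slice, PySem.List.enumerate, PySem.List.pyGet?, PySem.List.pyIdx?, f0, g0, f1, g1, f2, g2, f3, g3, f4, g4, f5, g5, f6, g6, f7, g7, f8, g8, f9, g9]
  by_cases h7 : points < 5000
  · -- 2000 ≤ points < 5000
    have f0 : ¬ (points < 0) := by omega
    have g0 : 0 ≤ points := by omega
    have f1 : ¬ (points < 50) := by omega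
    have g1 : 50 ≤ points := by omega
    have f2 : ¬ (points < 150) := by omega
    have g2 : 150 ≤ points := by omega
    have f3 : ¬ (points < 300) := by omega
    have g3 : 300 ≤ points := by omega
    have f4 : ¬ (points < 500) := by omega
    have g4 : 500 ≤ points := by omega
    have f5 : ¬ (points < 1000) := by omega
    have g5 : 1000 ≤ points := by omega
    have f6 : ¬ (points < 2000) := by omega
    have g6 : 2000 ≤ points := by omega
    have f7 : points < 5000 := by omega
    have g7 : ¬ (5000 ≤ points) := by omega
    have f8 : points < 10000 := by omega
    have g8 : ¬ (10000 ≤ points) := by omega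
    have f9 : points < 20000 := by omega
    have g9 : ¬ (20000 ≤ points) := by omega
    simp [pvLoopA, pvBisect, PySem.List.slice, PySem.List.enumerate, PySem.List.pyGet?, PySem.List.pyIdx?, f0, g0, f1, g1, f2, g2, f3, g3, f4, g4, f5, g5, f6, g6, f7, g7, f8, g8, f9, g9]
  by_cases h8 : points < 10000
  · -- 5000 ≤ points < 10000
    have f0 : ¬ (points < 0) := by omega
    have g0 : 0 ≤ points := by omega
    have f1 : ¬ (points < 50) := by omega
    have g1 : 50 ≤ points := by omega
    have f2 : ¬ (points < 150) := by omega
    have g2 : 150 ≤ points := by omega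
    have f3 : ¬ (points < 300) := by omega
    have g3 : 300 ≤ points := by omega
    have f4 : ¬ (points < 500) := by omega
    have g4 : 500 ≤ points := by omega
    have f5 : ¬ (points < 1000) := by omega
    have g5 : 1000 ≤ points := by omega
    have f6 : ¬ (points < 2000) := by omega
    have g6 : 2000 ≤ points := by omega
    have f7 : ¬ (points < 5000) := by omega
    have g7 : 5000 ≤ points := by omega
    have f8 : points < 10000 := by omega
    have g8 : ¬ (10000 ≤ points) := by omega
    have f9 : points < 20000 := by omega
    have g9 : ¬ (20000 ≤ points) := by omega
    simp [pvLoopA, pvBisect, PySem.List.slice, PySem.List.enumerate, PySem.List.pyGet?, PySem.List.pyIdx?, f0, g0, f1, g1, f2, g2, f3, g3, f4, g4, f5, g5, f6, g6, f7, g7, f8, g8, f9, g9]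
  by_cases h9 : points < 20000
  · -- 10000 ≤ points < 20000
    have f0 : ¬ (points < 0) := by omega
    have g0 : 0 ≤ points := by omega
    have f1 : ¬ (points < 50) := by omega
    have g1 : 50 ≤ points := by omega
    have f2 : ¬ (points < 150) := by omega
    have g2 : 150 ≤ points := by omega
    have f3 : ¬ (points < 300) := by omega
    have g3 : 300 ≤ points := by omega
    have f4 : ¬ (points < 500) := by omega
    have g4 : 500 ≤ points := by omega
    have f5 : ¬ (points < 1000) := by omega
    have g5 : 1000 ≤ points := by omega
    have f6 : ¬ (points < 2000) := by omega
    have g6 : 2000 ≤ points := by omega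
    have f7 : ¬ (points < 5000) := by omega
    have g7 : 5000 ≤ points := by omega
    have f8 : ¬ (points < 10000) := by omega
    have g8 : 10000 ≤ points := by omega
    have f9 : points < 20000 := by omega
    have g9 : ¬ (20000 ≤ points) := by omega
    simp [pvLoopA, pvBisect, PySem.List.slice, PySem.List.enumerate, PySem.List.pyGet?, PySem.List.pyIdx?, f0, g0, f1, g1, f2, g2, f3, g3, f4, g4, f5, g5, f6, g6, f7, g7, f8, g8, f9, g9]
  have f0 : ¬ (points < 0) := by omega
  have g0 : 0 ≤ points := by omega
  have f1 : ¬ (points < 50) := by omega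
  have g1 : 50 ≤ points := by omega
  have f2 : ¬ (points < 150) := by omega
  have g2 : 150 ≤ points := by omega
  have f3 : ¬ (points < 300) := by omega
  have g3 : 300 ≤ points := by omega
  have f4 : ¬ (points < 500) := by omega
  have g4 : 500 ≤ points := by omega
  have f5 : ¬ (points < 1000) := by omega
  have g5 : 1000 ≤ points := by omega
  have f6 : ¬ (points < 2000) := by omega
  have g6 : 2000 ≤ points := by omega
  have f7 : ¬ (points < 5000) := by omega
  have g7 : 5000 ≤ points := by omega
  have f8 : ¬ (points < 10000) := by omega
  have g8 : 10000 ≤ points := by omega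
  have f9 : ¬ (points < 20000) := by omega
  have g9 : 20000 ≤ points := by omega
  simp [pvLoopA, pvBisect, PySem.List.slice, PySem.List.enumerate, PySem.List.pyGet?, PySem.List.pyIdx?, f0, g0, f1, g1, f2, g2, f3, g3, f4, g4, f5, g5, f6, g6, f7, g7, f8, g8, f9, g9]
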